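-- pv_equiv track=rewrite | github.com/hube12/mccracking2 | Ressources/genLayer.py | sameClass
-- ===== SOURCE A (Python) =====
-- def sameClass(biomeA, biomeB):
--     flag = False
--     biomeClass = {"ocean": [0, 10, 24],
--                   "plains": [1, 129],
--                   "desert": [2, 17,  130],
--                   "hills": [3, 20, 34, 131, 162],
--                   "forest": [4, 18, 132, 157,27, 28, 29],
--                   "taiga": [5, 19, 30, 31, 32, 33, 133, 158, 160, 161],
--                   "swamp": [6, 134],
--                   "river": [7, 11],
--                   "hell": [8],
--                   "end": [9],
--                   "mushroom": [14, 15],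
--                   "mesa": [37, 38, 39],
--                   "savanna": [35, 36],
--                   "beach": [16, 26],
--                   "stonebeach": [25],
--                   "jungle": [21, 22, 23, 149, 151],
--                   "savannaMutated": [163, 164],
--                   "forestMutated": [155, 156],
--                   "snow": [12, 13, 140],
--                   "void": [127]}
--     for el in biomeClass:
--         if biomeB in biomeClass[el] and biomeA in biomeClass[el]:
--             flag = True
--     return flag
-- ===== SOURCE B (Python) =====
-- # Flat biome->class lookup: two O(1) dict gets replace the loop over all class lists.
-- _BIOME_CLASS = {
--     0: 'ocean',
--     10: 'ocean',
--     24: 'ocean',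
--     1: 'plains',
--     129: 'plains',
--     2: 'desert',
--     17: 'desert',
--     130: 'desert',
--     3: 'hills',
--     20: 'hills',
--     34: 'hills',
--     131: 'hills',
--     162: 'hills',
--     4: 'forest',
--     18: 'forest',
--     132: 'forest',
--     157: 'forest',
--     27: 'forest',
--     28: 'forest',
--     29: 'forest',
--     5: 'taiga',
--     19: 'taiga',
--     30: 'taiga',
--     31: 'taiga',
--     32: 'taiga',
--     33: 'taiga',
--     133: 'taiga',
--     158: 'taiga',
--     160: 'taiga',
--     161: 'taiga',
--     6: 'swamp',
--     134: 'swamp',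
--     7: 'river',
--     11: 'river',
--     8: 'hell',
--     9: 'end',
--     14: 'mushroom',
--     15: 'mushroom',
--     37: 'mesa',
--     38: 'mesa',
--     39: 'mesa',
--     35: 'savanna',
--     36: 'savanna',
--     16: 'beach',
--     26: 'beach',
--     25: 'stonebeach',
--     21: 'jungle',
--     22: 'jungle',
--     23: 'jungle',
--     149: 'jungle',
--     151: 'jungle',
--     163: 'savannaMutated',
--     164: 'savannaMutated',
--     155: 'forestMutated',
--     156: 'forestMutated',
--     12: 'snow',
--     13: 'snow',
--     140: 'snow',
--     127: 'void',
-- }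
--
--
-- def sameClass(biomeA, biomeB):
--     cA = _BIOME_CLASS.get(biomeA)
--     return cA is not None and cA == _BIOME_CLASS.get(biomeB)
-- ===== Notes on version B (the rewrite author's own statement) =====
-- stated objective: simpler
-- what changed: A rebuilds the class->biomes dict on every call and scans all 20 class lists for both biomes; B inverts that data once into a flat module-level biome->class dict and answers with two direct lookups and a None-guarded comparison, with no loop at all.
import Mathlib
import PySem

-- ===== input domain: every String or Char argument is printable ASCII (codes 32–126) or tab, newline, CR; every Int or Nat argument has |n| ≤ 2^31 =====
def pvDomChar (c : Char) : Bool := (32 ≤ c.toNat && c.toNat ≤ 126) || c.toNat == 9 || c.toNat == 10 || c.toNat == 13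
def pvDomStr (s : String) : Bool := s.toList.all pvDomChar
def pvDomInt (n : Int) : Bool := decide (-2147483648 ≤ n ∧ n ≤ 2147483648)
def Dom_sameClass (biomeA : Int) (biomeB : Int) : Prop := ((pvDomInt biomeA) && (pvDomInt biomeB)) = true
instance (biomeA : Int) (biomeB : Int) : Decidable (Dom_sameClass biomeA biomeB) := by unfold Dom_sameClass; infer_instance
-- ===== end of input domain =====

-- B replaces A's per-call scan over all 20 class lists by two lookups in a flat
-- biome-id -> class-name dictionary (simpler: no loop, just two gets and a compare).

-- ===== PORT A =====
-- the hard-coded class -> biome-ids dict of A, in source order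
def pyBiomeClass : PySem.Dict String (List Int) := PySem.Dict.ofList [
    ("ocean", [0, 10, 24]),
    ("plains", [1, 129]),
    ("desert", [2, 17, 130]),
    ("hills", [3, 20, 34, 131, 162]),
    ("forest", [4, 18, 132, 157, 27, 28, 29]),
    ("taiga", [5, 19, 30, 31, 32, 33, 133, 158, 160, 161]),
    ("swamp", [6, 134]),
    ("river", [7, 11]),
    ("hell", [8]),
    ("end", [9]),
    ("mushroom", [14, 15]),
    ("mesa", [37, 38, 39]),
    ("savanna", [35, 36]),
    ("beach", [16, 26]),
    ("stonebeach", [25]),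
    ("jungle", [21, 22, 23, 149, 151]),
    ("savannaMutated", [163, 164]),
    ("forestMutated", [155, 156]),
    ("snow", [12, 13, 140]),
    ("void", [127])]

-- 'for el in biomeClass: if biomeB in biomeClass[el] and biomeA in biomeClass[el]: flag = True'
def sameClass (biomeA : Int) (biomeB : Int) : Bool :=
  (PySem.Dict.keys pyBiomeClass).foldl
    (fun flag el =>
      if (PySem.Dict.getD pyBiomeClass el []).contains biomeB
          && (PySem.Dict.getD pyBiomeClass el []).contains biomeA
      then true else flag)
    false

-- ===== PORT B =====
-- the flat biome-id -> class-name dict of Source B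
def biomeLookup : PySem.Dict Int String := PySem.Dict.ofList [
    (0, "ocean"),
    (10, "ocean"),
    (24, "ocean"),
    (1, "plains"),
    (129, "plains"),
    (2, "desert"),
    (17, "desert"),
    (130, "desert"),
    (3, "hills"),
    (20, "hills"),
    (34, "hills"),
    (131, "hills"),
    (162, "hills"),
    (4, "forest"),
    (18, "forest"),
    (132, "forest"),
    (157, "forest"),
    (27, "forest"),
    (28, "forest"),
    (29, "forest"),
    (5, "taiga"),
    (19, "taiga"),
    (30, "taiga"),
    (31, "taiga"),
    (32, "taiga"),
    (33, "taiga"),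
    (133, "taiga"),
    (158, "taiga"),
    (160, "taiga"),
    (161, "taiga"),
    (6, "swamp"),
    (134, "swamp"),
    (7, "river"),
    (11, "river"),
    (8, "hell"),
    (9, "end"),
    (14, "mushroom"),
    (15, "mushroom"),
    (37, "mesa"),
    (38, "mesa"),
    (39, "mesa"),
    (35, "savanna"),
    (36, "savanna"),
    (16, "beach"),
    (26, "beach"),
    (25, "stonebeach"),
    (21, "jungle"),
    (22, "jungle"),
    (23, "jungle"),
    (149, "jungle"),
    (151, "jungle"),
    (163, "savannaMutated"),
    (164, "savannaMutated"),
    (155, "forestMutated"),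
    (156, "forestMutated"),
    (12, "snow"),
    (13, "snow"),
    (140, "snow"),
    (127, "void")]

-- 'cA = _BIOME_CLASS.get(biomeA); return cA is not None and cA == _BIOME_CLASS.get(biomeB)'
def sameClass_alt (biomeA : Int) (biomeB : Int) : Bool :=
  match PySem.Dict.get? biomeLookup biomeA with
  | none => false
  | some cA => PySem.Dict.get? biomeLookup biomeB == some cA

-- ===== PRECONDITION & SPEC =====
def Spec_sameClass (biomeA : Int) (biomeB : Int) (out : Bool) : Prop := out = sameClass_alt biomeA biomeB
instance (biomeA : Int) (biomeB : Int) (out : Bool) : Decidable (Spec_sameClass biomeA biomeB out) := by unfold Spec_sameClass; infer_instance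

-- ===== CLAIM (what is proved, stated in full; the proofs are below) =====
def Claim_equal_sameClass : Prop := ∀ (biomeA : Int) (biomeB : Int), Dom_sameClass biomeA biomeB → Spec_sameClass biomeA biomeB (sameClass biomeA biomeB)

-- ===== LEMMAS AND PROOFS =====

-- A's loop shape: the flag starts false and is set to true when the condition fires
theorem foldl_flag {α : Type} (p : α → Bool) (l : List α) (f : Bool) :
    l.foldl (fun flag x => if p x then true else flag) f = (f || l.any p) := by
  induction l generalizing f with
  | nil => simp
  | cons x xs ih =>
    simp only [List.foldl_cons, List.any_cons, ih]
    by_cases h : p x = true <;> simp [h]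

-- every id of a class list maps, under B's flat dict, to that class's name
set_option maxRecDepth 20000 in
theorem lookup_of_mem_class :
    ∀ p ∈ pyBiomeClass.items, ∀ x ∈ p.2, PySem.Dict.get? biomeLookup x = some p.1 := by
  decide

-- every entry of B's flat dict comes from a class list of A's dict
set_option maxRecDepth 20000 in
theorem class_of_lookup :
    ∀ q ∈ biomeLookup.items, ∃ p ∈ pyBiomeClass.items, p.1 = q.2 ∧ q.1 ∈ p.2 := by
  decide

-- class names are distinct, so an item of A's dict is determined by its name
set_option maxRecDepth 20000 in
theorem item_unique :
    ∀ p ∈ pyBiomeClass.items, ∀ p' ∈ pyBiomeClass.items, p.1 = p'.1 → p = p' := by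
  decide

set_option maxRecDepth 20000 in
theorem nodup_keys_A : pyBiomeClass.keys.Nodup := by decide

set_option maxRecDepth 20000 in
theorem nodup_keys_B : biomeLookup.keys.Nodup := by decide

-- A's fold is an 'any' over the items of its dict
theorem sameClass_eq_any (a b : Int) :
    sameClass a b = pyBiomeClass.items.any (fun p => p.2.contains b && p.2.contains a) := by
  unfold sameClass
  rw [foldl_flag]
  simp only [Bool.false_or, PySem.Dict.keys, List.any_map]
  refine PySem.List.any_congr_mem (fun p hp => ?_)
  obtain ⟨n, l⟩ := p
  simp only [Function.comp]
  rw [PySem.Dict.getD_of_mem_items pyBiomeClass hp nodup_keys_A]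

theorem alt_none {a : Int} (b : Int) (h : PySem.Dict.get? biomeLookup a = none) :
    sameClass_alt a b = false := by
  unfold sameClass_alt
  rw [h]

theorem alt_some {a : Int} (b : Int) {cA : String} (h : PySem.Dict.get? biomeLookup a = some cA) :
    sameClass_alt a b = (PySem.Dict.get? biomeLookup b == some cA) := by
  unfold sameClass_alt
  rw [h]

set_option maxRecDepth 20000 in
theorem sameClass_eq (a b : Int) : sameClass a b = sameClass_alt a b := by
  rw [sameClass_eq_any]
  cases hA : PySem.Dict.get? biomeLookup a with
  | none =>
    rw [alt_none b hA]
    simp only [List.any_eq_false]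
    intro p hp
    simp only [Bool.and_eq_true, List.contains_iff_mem, not_and]
    intro _ ha
    exact (Option.some_ne_none _ (by rw [← lookup_of_mem_class p hp a ha, hA])).elim
  | some cA =>
    rw [alt_some b hA]
    cases hB : PySem.Dict.get? biomeLookup b with
    | none =>
      simp only [Option.none_beq_some]
      simp only [List.any_eq_false]
      intro p hp
      simp only [Bool.and_eq_true, List.contains_iff_mem, not_and]
      intro hb _
      exact (Option.some_ne_none _ (by rw [← lookup_of_mem_class p hp b hb, hB])).elim
    | some cB =>
      by_cases hc : cB = cA
      · subst hc
        simp only [beq_self_eq_true]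
        -- both a and b are in the class named cB: find the common item
        have hAi := (PySem.Dict.get?_eq_some_iff_mem_items biomeLookup a cB nodup_keys_B).mp hA
        have hBi := (PySem.Dict.get?_eq_some_iff_mem_items biomeLookup b cB nodup_keys_B).mp hB
        obtain ⟨p, hp, hpn, hpa⟩ := class_of_lookup (a, cB) hAi
        obtain ⟨p', hp', hpn', hpb⟩ := class_of_lookup (b, cB) hBi
        have : p = p' := item_unique p hp p' hp' (by rw [hpn, hpn'])
        subst this
        simp only [List.any_eq_true]
        exact ⟨p, hp, by simp [hpa, hpb]⟩
      · have he : (some cB == some cA) = false := by simp [hc]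
        rw [he]
        simp only [List.any_eq_false]
        intro p hp
        simp only [Bool.and_eq_true, List.contains_iff_mem, not_and]
        intro hb ha
        have h1 : some p.1 = some cA := by rw [← lookup_of_mem_class p hp a ha, hA]
        have h2 : some p.1 = some cB := by rw [← lookup_of_mem_class p hp b hb, hB]
        exact hc (by injection h1 with h1; injection h2 with h2; rw [← h2, h1])

-- ===== VERDICT (by name: the statement is the Claim_ definition above) =====
theorem sameClass_spec : Claim_equal_sameClass := by
  intro a b _
  unfold Spec_sameClass
  exact sameClass_eq a b
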